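-- pv_equiv track=rewrite | github.com/Weszybz/Premier-League-Interactive-NLP-Chatbot | hhh.py | is_valid_team
-- ===== SOURCE A (Python) =====
-- team_aliases = {
--     "Manchester United": ["Man U", "Man Utd", "United", "Manchester U"],
--     "Manchester City": ["Man City", "City", "MCFC"],
--     "Arsenal": ["Gunners", "Arsenal FC"],
--     "Tottenham": ["Spurs", "Tottenham Hotspur"],
--     "Chelsea": ["Blues", "Chelsea FC"],
--     "Liverpool": ["Reds", "Liverpool FC"],
--     "Newcastle": ["Magpies", "Toon", "Newcastle United"],
--     "West Ham": ["Hammers", "West Ham United"],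
--     "Aston Villa": ["Villa", "AVFC"],
--     "Wolves": ["Wolverhampton Wanderers"],
--     "Brighton": ["Brighton & Hove Albion", "Seagulls"],
--     "Leicester": ["Foxes", "Leicester City"],
--     "Crystal Palace": ["Palace", "Eagles"],
--     "Everton": ["Toffees", "Everton FC"],
--     "Southampton": ["Saints"],
--     "Nottingham Forest": ["Forest"],
--     "Leeds": ["Leeds United", "Whites"],
--     "Burnley": ["Clarets"],
--     "Sheffield United": ["Blades", "Sheffield"],
--     "Bournemouth": ["Cherries", "AFC Bournemouth"]
-- }
--
-- def is_valid_team(team_name):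
--     """Check if the team name or alias matches a valid Premier League team."""
--     team_name_lower = team_name.lower()
--
--     # Check against full team names (case-insensitive)
--     if team_name_lower in (team.lower() for team in team_aliases.keys()):
--         return True
--
--     # Check against aliases (case-insensitive)
--     for aliases in team_aliases.values():
--         if team_name_lower in map(str.lower, aliases):
--             return True
--
--     return False
-- ===== SOURCE B (Python) =====
-- # All valid identifiers (team names and aliases), lowercased, as a sorted tuple;
-- # membership is decided by a hand-written binary search instead of scanning the dict.
-- _VALID = (
--     'afc bournemouth',
--     'arsenal',
--     'arsenal fc',
--     'aston villa',
--     'avfc',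
--     'blades',
--     'blues',
--     'bournemouth',
--     'brighton',
--     'brighton & hove albion',
--     'burnley',
--     'chelsea',
--     'chelsea fc',
--     'cherries',
--     'city',
--     'clarets',
--     'crystal palace',
--     'eagles',
--     'everton',
--     'everton fc',
--     'forest',
--     'foxes',
--     'gunners',
--     'hammers',
--     'leeds',
--     'leeds united',
--     'leicester',
--     'leicester city',
--     'liverpool',
--     'liverpool fc',
--     'magpies',
--     'man city',
--     'man u',
--     'man utd',
--     'manchester city',
--     'manchester u',
--     'manchester united',
--     'mcfc',
--     'newcastle',
--     'newcastle united',
--     'nottingham forest',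
--     'palace',
--     'reds',
--     'saints',
--     'seagulls',
--     'sheffield',
--     'sheffield united',
--     'southampton',
--     'spurs',
--     'toffees',
--     'toon',
--     'tottenham',
--     'tottenham hotspur',
--     'united',
--     'villa',
--     'west ham',
--     'west ham united',
--     'whites',
--     'wolverhampton wanderers',
--     'wolves',
-- )
--
-- def is_valid_team(team_name):
--     """Check if the team name or alias matches a valid Premier League team."""
--     x = team_name.lower()
--     lo, hi = 0, len(_VALID)
--     while lo < hi:
--         mid = (lo + hi) // 2
--         if _VALID[mid] < x:
--             lo = mid + 1
--         else:
--             hi = mid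
--     return lo < len(_VALID) and _VALID[lo] == x
-- ===== Notes on version B (the rewrite author's own statement) =====
-- stated objective: alternative
-- what changed: Replaces A's two-phase linear scan of the alias dict (lowercasing keys, then looping over every alias list) by a hand-written binary search over a precomputed sorted tuple of all 60 lowercase names/aliases.
import Mathlib
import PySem

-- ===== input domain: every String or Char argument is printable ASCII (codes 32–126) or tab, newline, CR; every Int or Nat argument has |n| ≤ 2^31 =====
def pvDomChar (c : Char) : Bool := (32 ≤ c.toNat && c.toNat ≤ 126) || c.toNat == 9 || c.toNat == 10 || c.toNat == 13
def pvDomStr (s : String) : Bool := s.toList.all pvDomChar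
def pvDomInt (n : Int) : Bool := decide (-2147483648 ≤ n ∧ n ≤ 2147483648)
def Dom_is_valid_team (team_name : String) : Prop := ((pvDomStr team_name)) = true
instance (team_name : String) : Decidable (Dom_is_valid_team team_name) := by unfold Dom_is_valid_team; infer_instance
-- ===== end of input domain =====

-- B replaces A's two-phase scan of the alias dict by a hand-written binary search over a
-- precomputed sorted tuple of all lowercase names/aliases (alternative algorithm/data structure).

-- ===== PORT A =====
-- the module-level dict team_aliases (insertion order)
def teamAliases : PySem.Dict String (List String) := PySem.Dict.ofList
  [("Manchester United", ["Man U", "Man Utd", "United", "Manchester U"]),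
   ("Manchester City", ["Man City", "City", "MCFC"]),
   ("Arsenal", ["Gunners", "Arsenal FC"]),
   ("Tottenham", ["Spurs", "Tottenham Hotspur"]),
   ("Chelsea", ["Blues", "Chelsea FC"]),
   ("Liverpool", ["Reds", "Liverpool FC"]),
   ("Newcastle", ["Magpies", "Toon", "Newcastle United"]),
   ("West Ham", ["Hammers", "West Ham United"]),
   ("Aston Villa", ["Villa", "AVFC"]),
   ("Wolves", ["Wolverhampton Wanderers"]),
   ("Brighton", ["Brighton & Hove Albion", "Seagulls"]),
   ("Leicester", ["Foxes", "Leicester City"]),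
   ("Crystal Palace", ["Palace", "Eagles"]),
   ("Everton", ["Toffees", "Everton FC"]),
   ("Southampton", ["Saints"]),
   ("Nottingham Forest", ["Forest"]),
   ("Leeds", ["Leeds United", "Whites"]),
   ("Burnley", ["Clarets"]),
   ("Sheffield United", ["Blades", "Sheffield"]),
   ("Bournemouth", ["Cherries", "AFC Bournemouth"])]

-- the 'for aliases in team_aliases.values(): if … return True' loop, with early return
def pvAliasLoop (l : String) : List (List String) → Bool
  | [] => false
  | aliases :: rest =>
      if (aliases.map PySem.Str.lower).contains l then true else pvAliasLoop l rest

def is_valid_team (team_name : String) : Bool :=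
  let team_name_lower := PySem.Str.lower team_name
  if ((PySem.Dict.keys teamAliases).map PySem.Str.lower).contains team_name_lower then
    true
  else
    pvAliasLoop team_name_lower (PySem.Dict.values teamAliases)

-- ===== PORT B =====
-- the module-level sorted tuple _VALID of Source B
def pvValid : List String :=
  ["afc bournemouth",
   "arsenal",
   "arsenal fc",
   "aston villa",
   "avfc",
   "blades",
   "blues",
   "bournemouth",
   "brighton",
   "brighton & hove albion",
   "burnley",
   "chelsea",
   "chelsea fc",
   "cherries",
   "city",
   "clarets",
   "crystal palace",
   "eagles",
   "everton",
   "everton fc",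
   "forest",
   "foxes",
   "gunners",
   "hammers",
   "leeds",
   "leeds united",
   "leicester",
   "leicester city",
   "liverpool",
   "liverpool fc",
   "magpies",
   "man city",
   "man u",
   "man utd",
   "manchester city",
   "manchester u",
   "manchester united",
   "mcfc",
   "newcastle",
   "newcastle united",
   "nottingham forest",
   "palace",
   "reds",
   "saints",
   "seagulls",
   "sheffield",
   "sheffield united",
   "southampton",
   "spurs",
   "toffees",
   "toon",
   "tottenham",
   "tottenham hotspur",
   "united",
   "villa",
   "west ham",
   "west ham united",
   "whites",
   "wolverhampton wanderers",
   "wolves"]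

-- the 'while lo < hi' binary-search loop of Source B, step for step.
-- Python's 'str < str' is code-point lexicographic comparison: exactly List Char '<' on .toList.
def pvBSearch (x : String) (lo hi : Nat) : Nat :=
  if _h : lo < hi then
    if (pvValid.getD ((lo + hi) / 2) "").toList < x.toList then pvBSearch x ((lo + hi) / 2 + 1) hi
    else pvBSearch x lo ((lo + hi) / 2)
  else lo
termination_by hi - lo
decreasing_by all_goals omega

def is_valid_team_alt (team_name : String) : Bool :=
  let x := PySem.Str.lower team_name
  let lo := pvBSearch x 0 pvValid.length
  decide (lo < pvValid.length) && (pvValid.getD lo "" == x)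

-- ===== PRECONDITION & SPEC =====
def Spec_is_valid_team (team_name : String) (out : Bool) : Prop := out = is_valid_team_alt team_name
instance (team_name : String) (out : Bool) : Decidable (Spec_is_valid_team team_name out) := by unfold Spec_is_valid_team; infer_instance

-- ===== CLAIM (what is proved, stated in full; the proofs are below) =====
def Claim_equal_is_valid_team : Prop := ∀ (team_name : String), Dom_is_valid_team team_name → Spec_is_valid_team team_name (is_valid_team team_name)

-- ===== LEMMAS AND PROOFS =====

-- the flat lowercase list A effectively tests membership in
def pvLA : List String :=
  ((PySem.Dict.keys teamAliases).map PySem.Str.lower) ++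
    (((PySem.Dict.values teamAliases).flatMap id).map PySem.Str.lower)

theorem pvAliasLoop_eq (l : String) (vs : List (List String)) :
    pvAliasLoop l vs = ((vs.flatMap id).map PySem.Str.lower).contains l := by
  induction vs with
  | nil => simp [pvAliasLoop]
  | cons a rest ih =>
      simp only [pvAliasLoop, List.flatMap_cons, List.map_append, List.contains_append, id_eq, ih]
      cases h : (a.map PySem.Str.lower).contains l <;> simp

theorem pvA_eq_LA (t : String) : is_valid_team t = pvLA.contains (PySem.Str.lower t) := by
  unfold is_valid_team pvLA
  simp only [List.contains_append, pvAliasLoop_eq]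
  simp

theorem pvLA_sub : ∀ a ∈ pvLA, a ∈ pvValid := by decide

theorem pvValid_sub : ∀ a ∈ pvValid, a ∈ pvLA := by decide

theorem pvValid_sorted : pvValid.Pairwise (fun a b => a.toList < b.toList) := by decide

theorem pvValid_mono : ∀ i j : Nat, i ≤ j → j < pvValid.length →
    (pvValid.getD i "").toList ≤ (pvValid.getD j "").toList := by
  intro i j hij hj
  rcases Nat.lt_or_ge i j with h | h
  · rw [List.getD_eq_getElem _ _ (by omega), List.getD_eq_getElem _ _ hj]
    exact le_of_lt ((List.pairwise_iff_getElem.mp pvValid_sorted) i j (by omega) hj h)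
  · have : i = j := by omega
    subst this; exact le_refl _

theorem pvBSearch_spec (x : String) : ∀ (k lo hi : Nat), hi - lo = k → lo ≤ hi →
    hi ≤ pvValid.length →
    (∀ i, i < lo → (pvValid.getD i "").toList < x.toList) →
    (∀ i, hi ≤ i → i < pvValid.length → x.toList ≤ (pvValid.getD i "").toList) →
    pvBSearch x lo hi ≤ pvValid.length ∧
      (∀ i, i < pvBSearch x lo hi → (pvValid.getD i "").toList < x.toList) ∧
      (∀ i, pvBSearch x lo hi ≤ i → i < pvValid.length → x.toList ≤ (pvValid.getD i "").toList) := by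
  intro k
  induction k using Nat.strong_induction_on with
  | _ k ih =>
    intro lo hi hk hle hlen hlow hhigh
    unfold pvBSearch
    by_cases h : lo < hi
    · simp only [h, dif_pos]
      by_cases hm : (pvValid.getD ((lo + hi) / 2) "").toList < x.toList
      · simp only [hm, if_pos]
        refine ih (hi - ((lo + hi) / 2 + 1)) (by omega) _ _ rfl (by omega) hlen ?_ hhigh
        intro i hi2
        exact lt_of_le_of_lt (pvValid_mono i ((lo + hi) / 2) (by omega) (by omega)) hm
      · simp only [hm, if_neg, not_false_iff]
        refine ih ((lo + hi) / 2 - lo) (by omega) _ _ rfl (by omega) (by omega) hlow ?_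
        intro i hi2 hi3
        exact le_trans (not_lt.mp hm) (pvValid_mono _ i hi2 hi3)
    · simp only [h, dif_neg, not_false_iff]
      have : lo = hi := by omega
      subst this
      exact ⟨le_trans hle hlen, hlow, hhigh⟩

theorem pvB_eq_mem (t : String) :
    is_valid_team_alt t = pvValid.contains (PySem.Str.lower t) := by
  unfold is_valid_team_alt
  set x := PySem.Str.lower t with hx
  obtain ⟨hle, hlt, hge⟩ := pvBSearch_spec x (pvValid.length - 0) 0 pvValid.length rfl
    (Nat.zero_le _) (le_refl _) (by intro i h; omega) (by intro i h1 h2; omega)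
  set r := pvBSearch x 0 pvValid.length with hr
  by_cases hmem : x ∈ pvValid
  · obtain ⟨i, hi, hxi⟩ := List.mem_iff_getElem.mp hmem
    have hir : r ≤ i := by
      by_contra hcon
      have := hlt i (by omega)
      rw [List.getD_eq_getElem _ _ hi, hxi] at this
      exact lt_irrefl _ this
    have hrn : r < pvValid.length := by omega
    have h1 : x.toList ≤ (pvValid.getD r "").toList := hge r (le_refl _) hrn
    have h2 : (pvValid.getD r "").toList ≤ x.toList := by
      have := pvValid_mono r i hir hi
      rwa [List.getD_eq_getElem _ _ hi, hxi] at this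
    have heq : pvValid.getD r "" = x := String.ext (le_antisymm h2 h1)
    have hc : pvValid.contains x = true := List.contains_iff_mem.mpr hmem
    rw [hc]
    simp only [Bool.and_eq_true, decide_eq_true_iff, beq_iff_eq]
    exact ⟨hrn, heq⟩
  · have hc : pvValid.contains x = false := by
      simpa using hmem
    rw [hc]
    simp only [Bool.and_eq_false_iff]
    rcases Nat.lt_or_ge r pvValid.length with h1 | h1
    · have h2 : (pvValid.getD r "" == x) = false := by
        refine beq_eq_false_iff_ne.mpr fun hcon => hmem ?_
        rw [← hcon, List.getD_eq_getElem _ _ h1]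
        exact List.getElem_mem _
      exact Or.inr h2
    · exact Or.inl (decide_eq_false (Nat.not_lt.mpr h1))

-- ===== VERDICT (by name: the statement is the Claim_ definition above) =====
theorem is_valid_team_spec : Claim_equal_is_valid_team := by
  intro t _
  unfold Spec_is_valid_team
  rw [pvA_eq_LA, pvB_eq_mem]
  by_cases h : PySem.Str.lower t ∈ pvValid
  · have h2 : PySem.Str.lower t ∈ pvLA := pvValid_sub _ h
    simp [h, h2]
  · have h2 : PySem.Str.lower t ∉ pvLA := fun hc => h (pvLA_sub _ hc)
    simp [h, h2]
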